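-- pv_equiv track=rewrite | github.com/OliverIgnetik/Data-Structures-Algorithms-Python | Arrays/dutch_flag_partition.py | dutch_flag_partition_1
-- ===== SOURCE A (Python) =====
-- def dutch_flag_partition_1(pivot_index, A):
--     """
--     Complexity
--     Time : O(N^2)
--     Space : O(1)
--     """
--     pivot = A[pivot_index]
--
--     # group elements smaller than the pivot
--     for i in range(len(A)):
--         for j in range(i + 1, len(A)):
--             if A[j] < pivot:
--                 A[i], A[j] = A[j], A[i]
--                 break
--
--     # group elements larger than the pivot
--     for i in reversed(range(len(A))):
--         if A[i] < pivot:
--             break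
--
--         for j in reversed(range(i)):
--             if A[j] > pivot:
--                 A[i], A[j] = A[j], A[i]
--                 break
--
--     return A
-- ===== SOURCE B (Python) =====
-- def dutch_flag_partition_1(pivot_index, A):
--     pivot = A[pivot_index]
--     n = len(A)
--     p = 0
--     for i in range(n):
--         p = max(p, i + 1)
--         while p < n and A[p] >= pivot:
--             p += 1
--         if p == n:
--             break
--         A[i], A[p] = A[p], A[i]
--     q = n - 1
--     for i in reversed(range(n)):
--         if A[i] < pivot:
--             break
--         q = min(q, i - 1)
--         while q >= 0 and A[q] <= pivot:
--             q -= 1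
--         if q >= 0:
--             A[i], A[q] = A[q], A[i]
--     return A
-- ===== Notes on version B (the rewrite author's own statement) =====
-- stated objective: faster
-- what changed: Replaces both quadratic inner scans by monotone frontier pointers (next-small index moving forward, next-large index moving backward) that reproduce A's exact swap sequence in one amortized-linear sweep per pass.
import Mathlib
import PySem

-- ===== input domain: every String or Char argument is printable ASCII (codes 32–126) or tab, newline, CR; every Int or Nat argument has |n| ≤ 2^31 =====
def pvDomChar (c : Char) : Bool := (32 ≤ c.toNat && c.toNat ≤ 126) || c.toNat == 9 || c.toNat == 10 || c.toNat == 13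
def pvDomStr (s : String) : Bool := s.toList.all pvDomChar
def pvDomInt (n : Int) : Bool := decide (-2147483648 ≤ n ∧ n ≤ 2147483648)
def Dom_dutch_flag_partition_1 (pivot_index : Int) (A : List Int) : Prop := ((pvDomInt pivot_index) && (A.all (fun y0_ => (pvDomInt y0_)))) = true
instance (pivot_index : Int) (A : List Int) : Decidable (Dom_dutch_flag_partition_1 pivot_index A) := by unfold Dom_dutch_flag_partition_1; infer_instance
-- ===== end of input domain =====

-- B replaces A's two quadratic inner scans by monotone frontier pointers reproducing the exact
-- same swap sequence (O(n) per pass); both Pythons mutate A in place identically, the theorems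
-- are about the returned list.

-- swap helper shared by both ports (A[i], A[j] = A[j], A[i])
def swapL (l : List Int) (i j : Nat) : List Int := (l.set i (l.getD j 0)).set j (l.getD i 0)

-- ===== PORT A =====
-- inner loop of pass 1: for j in js: if A[j] < pivot: swap; break
def innerS (pivot : Int) (i : Nat) (l : List Int) : List Nat → List Int
  | [] => l
  | j :: rest => if l.getD j 0 < pivot then swapL l i j else innerS pivot i l rest

-- outer loop of pass 1: for i in range(n)
def passA1 (pivot : Int) (n i : Nat) (l : List Int) : List Int :=
  if i < n then passA1 pivot n (i + 1) (innerS pivot i l (List.range' (i + 1) (n - (i + 1)))) else l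
termination_by n - i

-- inner loop of pass 2: for j in reversed(range(i)): if A[j] > pivot: swap; break
def innerL (pivot : Int) (i : Nat) (l : List Int) : List Nat → List Int
  | [] => l
  | j :: rest => if pivot < l.getD j 0 then swapL l i j else innerL pivot i l rest

-- outer loop of pass 2: for i in reversed(range(n)): if A[i] < pivot: break; …
def passA2 (pivot : Int) : Nat → List Int → List Int
  | 0, l => l
  | k + 1, l =>
    if l.getD k 0 < pivot then l
    else passA2 pivot k (innerL pivot k l (List.range k).reverse)

def dutch_flag_partition_1 (pivot_index : Int) (A : List Int) : List Int :=
  match PySem.List.pyGet? A pivot_index with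
  | none => A  -- Python raises IndexError here; excluded by Pre_
  | some pivot => passA2 pivot A.length (passA1 pivot A.length 0 A)

-- ===== PORT B =====
-- while p < n and A[p] >= pivot: p += 1
def advP (pivot : Int) (l : List Int) (n p : Nat) : Nat :=
  if p < n then (if pivot ≤ l.getD p 0 then advP pivot l n (p + 1) else p) else p
termination_by n - p

-- pass 1 with the forward next-small frontier pointer p
def passB1 (pivot : Int) (n i p : Nat) (l : List Int) : List Int :=
  if i < n then
    let p' := advP pivot l n (max p (i + 1))
    if p' = n then l else passB1 pivot n (i + 1) p' (swapL l i p')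
  else l
termination_by n - i

-- while q >= 0 and A[q] <= pivot: q -= 1
def advQ (pivot : Int) (l : List Int) (q : Int) : Int :=
  if 0 ≤ q ∧ l.getD q.toNat 0 ≤ pivot then advQ pivot l (q - 1) else q
termination_by (q + 1).toNat
decreasing_by omega

-- pass 2 with the backward next-large frontier pointer q
def passB2 (pivot : Int) : Nat → Int → List Int → List Int
  | 0, _, l => l
  | k + 1, q, l =>
    if l.getD k 0 < pivot then l
    else
      let q' := advQ pivot l (min q ((k : Int) - 1))
      if 0 ≤ q' then passB2 pivot k q' (swapL l k q'.toNat) else passB2 pivot k q' l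

def dutch_flag_partition_1_alt (pivot_index : Int) (A : List Int) : List Int :=
  match PySem.List.pyGet? A pivot_index with
  | none => A
  | some pivot => passB2 pivot A.length ((A.length : Int) - 1) (passB1 pivot A.length 0 0 A)

-- ===== PRECONDITION & SPEC =====
-- Pre_ excludes exactly the inputs where A[pivot_index] raises IndexError.
def Pre_dutch_flag_partition_1 (pivot_index : Int) (A : List Int) : Prop :=
  PySem.Raise.InRange A.length pivot_index
instance (pivot_index : Int) (A : List Int) : Decidable (Pre_dutch_flag_partition_1 pivot_index A) := by
  unfold Pre_dutch_flag_partition_1; infer_instance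
def pvWitness_dutch_flag_partition_1 : Int × List Int := (1, [2, 0, 1, 3, 0])

def Spec_dutch_flag_partition_1 (pivot_index : Int) (A : List Int) (out : List Int) : Prop := out = dutch_flag_partition_1_alt pivot_index A
instance (pivot_index : Int) (A : List Int) (out : List Int) : Decidable (Spec_dutch_flag_partition_1 pivot_index A out) := by unfold Spec_dutch_flag_partition_1; infer_instance

-- ===== CLAIM (what is proved, stated in full; the proofs are below) =====
def Claim_equal_dutch_flag_partition_1 : Prop := ∀ (pivot_index : Int) (A : List Int), Dom_dutch_flag_partition_1 pivot_index A → Pre_dutch_flag_partition_1 pivot_index A → Spec_dutch_flag_partition_1 pivot_index A (dutch_flag_partition_1 pivot_index A)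

-- ===== LEMMAS AND PROOFS =====

theorem swapL_getD_ne (l : List Int) (i j m : Nat) (hi : m ≠ i) (hj : m ≠ j) :
    (swapL l i j).getD m 0 = l.getD m 0 := by
  simp [swapL, List.getD, List.getElem?_set_ne (Ne.symm hi), List.getElem?_set_ne (Ne.symm hj)]

theorem advP_ge (pivot : Int) (l : List Int) (n p : Nat) : p ≤ advP pivot l n p := by
  fun_induction advP with
  | case1 p h1 h2 ih => omega
  | case2 => omega
  | case3 => omega

theorem advP_le (pivot : Int) (l : List Int) (n p : Nat) (h : p ≤ n) : advP pivot l n p ≤ n := by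
  fun_induction advP with
  | case1 p h1 h2 ih => exact ih (by omega)
  | case2 => omega
  | case3 => omega

theorem advP_skipped (pivot : Int) (l : List Int) (n p : Nat) :
    ∀ j, p ≤ j → j < advP pivot l n p → pivot ≤ l.getD j 0 := by
  fun_induction advP with
  | case1 p h1 h2 ih =>
    intro j hj1 hj2
    rcases Nat.eq_or_lt_of_le hj1 with h | h
    · exact h ▸ h2
    · exact ih j h hj2
  | case2 p h1 h2 => intro j h1 h2; omega
  | case3 p h1 => intro j h1 h2; omega

theorem advP_skip (pivot : Int) (l : List Int) (n : Nat) :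
    ∀ a b, a ≤ b → b ≤ n → (∀ j, a ≤ j → j < b → pivot ≤ l.getD j 0) →
    advP pivot l n a = advP pivot l n b := by
  intro a b hab hbn hbig
  induction b, hab using Nat.le_induction with
  | base => rfl
  | succ b hab ih =>
    rw [ih (by omega) (fun j h1 h2 => hbig j h1 (by omega))]
    rw [advP, if_pos (by omega), if_pos (hbig b (by omega) (by omega))]

-- A's inner scan of pass 1 equals one frontier advance plus at most one swap
theorem innerS_eq (pivot : Int) (i n : Nat) (l : List Int) :
    ∀ s, s ≤ n → innerS pivot i l (List.range' s (n - s)) =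
      (if advP pivot l n s = n then l else swapL l i (advP pivot l n s)) := by
  intro s hs
  induction hm : n - s using Nat.strong_induction_on generalizing s with
  | _ m ih =>
  rw [advP]
  by_cases h1 : s < n
  · rw [if_pos h1, show m = (n - (s + 1)) + 1 by omega, List.range'_succ]
    by_cases h2 : pivot ≤ l.getD s 0
    · rw [if_pos h2]
      simp only [innerS, if_neg (by omega : ¬ l.getD s 0 < pivot)]
      exact ih (n - (s + 1)) (by omega) (s + 1) (by omega) rfl
    · rw [if_neg h2]
      simp only [innerS, if_pos (by omega : l.getD s 0 < pivot)]
      rw [if_neg (by omega)]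
  · rw [if_neg h1, if_pos (by omega), show m = 0 by omega]
    simp [innerS]

-- if no small element remains to the right, the rest of A's pass 1 is the identity
theorem passA1_id (pivot : Int) (n : Nat) (l : List Int) :
    ∀ i, (∀ j, i < j → j < n → pivot ≤ l.getD j 0) → passA1 pivot n i l = l := by
  intro i
  induction hm : n - i using Nat.strong_induction_on generalizing i with
  | _ m ih =>
  intro hbig
  by_cases hi : i < n
  · rw [passA1, if_pos hi]
    have hadv : advP pivot l n (i + 1) = n := by
      rw [advP_skip pivot l n (i + 1) n (by omega) (le_refl n) (fun j h1 h2 => hbig j (by omega) h2)]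
      rw [advP, if_neg (by omega)]
    rw [innerS_eq pivot i n l (i + 1) (by omega), if_pos hadv]
    exact ih (n - (i + 1)) (by omega) (i + 1) rfl (fun j h1 h2 => hbig j (by omega) h2)
  · rw [passA1, if_neg hi]

-- pass 1: the frontier loop equals the rescanning loop
theorem passB1_eq (pivot : Int) (n : Nat) :
    ∀ i p l, p ≤ n → (∀ j, i + 1 ≤ j → j < p → pivot ≤ l.getD j 0) →
    passB1 pivot n i p l = passA1 pivot n i l := by
  intro i
  induction hm : n - i using Nat.strong_induction_on generalizing i with
  | _ m ih =>
  intro p l hp hinv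
  by_cases hi : i < n
  · have hsn : max p (i + 1) ≤ n := by omega
    have hskip : advP pivot l n (i + 1) = advP pivot l n (max p (i + 1)) :=
      advP_skip pivot l n (i + 1) (max p (i + 1)) (by omega) hsn
        (fun j h1 h2 => hinv j h1 (by omega))
    have hrs : max p (i + 1) ≤ advP pivot l n (max p (i + 1)) := advP_ge pivot l n _
    have hrn : advP pivot l n (max p (i + 1)) ≤ n := advP_le pivot l n _ hsn
    have hskd := advP_skipped pivot l n (max p (i + 1))
    rw [passA1, if_pos hi, innerS_eq pivot i n l (i + 1) (by omega), hskip, passB1]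
    simp only [if_pos hi]
    by_cases hbreak : advP pivot l n (max p (i + 1)) = n
    · rw [if_pos hbreak, if_pos hbreak]
      refine (passA1_id pivot n l (i + 1) ?_).symm
      intro j h1 h2
      by_cases hjs : j < max p (i + 1)
      · exact hinv j (by omega) (by omega)
      · exact hskd j (by omega) (by omega)
    · rw [if_neg hbreak, if_neg hbreak]
      refine ih (n - (i + 1)) (by omega) (i + 1) rfl _ _ (by omega) ?_
      intro j h1 h2
      rw [swapL_getD_ne l i _ j (by omega) (by omega)]
      by_cases hjs : j < max p (i + 1)
      · exact hinv j (by omega) (by omega)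
      · exact hskd j (by omega) h2
  · rw [passB1, if_neg hi, passA1, if_neg hi]

theorem advQ_neg (pivot : Int) (l : List Int) (q : Int) (h : q < 0) : advQ pivot l q = q := by
  rw [advQ, if_neg (fun hc => absurd hc.1 (by omega))]

theorem advQ_le (pivot : Int) (l : List Int) (q : Int) : advQ pivot l q ≤ q := by
  fun_induction advQ with
  | case1 q h ih => omega
  | case2 => omega

theorem advQ_ge (pivot : Int) (l : List Int) (q : Int) (h : -1 ≤ q) : -1 ≤ advQ pivot l q := by
  fun_induction advQ with
  | case1 q h1 ih => exact ih (by omega)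
  | case2 q h1 => omega

theorem advQ_skipped (pivot : Int) (l : List Int) (q : Int) :
    ∀ j : Int, advQ pivot l q < j → j ≤ q → 0 ≤ j → l.getD j.toNat 0 ≤ pivot := by
  fun_induction advQ with
  | case1 q h ih =>
    intro j h1 h2 h3
    rcases eq_or_lt_of_le h2 with h4 | h4
    · subst h4; exact h.2
    · exact ih j h1 (by omega) h3
  | case2 q h => intro j h1 h2 h3; omega

theorem advQ_skip (pivot : Int) (l : List Int) :
    ∀ a b : Int, b ≤ a → -1 ≤ b → (∀ j : Int, b < j → j ≤ a → 0 ≤ j → l.getD j.toNat 0 ≤ pivot) →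
    advQ pivot l a = advQ pivot l b := by
  intro a b hba hbm hsk
  induction hm : (a - b).toNat using Nat.strong_induction_on generalizing a with
  | _ m ih =>
  rcases eq_or_lt_of_le hba with h | hlt
  · rw [h]
  · rw [advQ, if_pos ⟨by omega, hsk a hlt (le_refl a) (by omega)⟩]
    exact ih ((a - 1 - b).toNat) (by omega) (a - 1) (by omega)
      (fun j h1 h2 h3 => hsk j h1 (by omega) h3) rfl

-- A's inner scan of pass 2 equals one backward frontier advance plus at most one swap
theorem innerL_eq (pivot : Int) (i : Nat) (l : List Int) :
    ∀ t : Nat, innerL pivot i l (List.range' 0 t).reverse =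
      (if 0 ≤ advQ pivot l ((t : Int) - 1) then swapL l i (advQ pivot l ((t : Int) - 1)).toNat else l) := by
  intro t
  induction t with
  | zero =>
    rw [advQ_neg pivot l _ (by omega), if_neg (by omega)]
    simp [innerL]
  | succ t ih =>
    rw [show (List.range' 0 (t + 1)) = List.range' 0 t ++ [t] by simp [List.range'_1_concat],
        List.reverse_append]
    simp only [List.reverse_singleton, List.singleton_append, innerL]
    rw [show (((t + 1 : Nat) : Int) - 1) = ((t : Nat) : Int) by push_cast; ring]
    by_cases hlarge : pivot < l.getD t 0
    · have ha : advQ pivot l ((t : Nat) : Int) = ((t : Nat) : Int) := by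
        rw [advQ, if_neg (fun h => absurd h.2 (by simp only [Int.toNat_natCast]; omega))]
      rw [if_pos hlarge, ha, if_pos (by omega)]
      simp
    · have ha : advQ pivot l ((t : Nat) : Int) = advQ pivot l (((t : Nat) : Int) - 1) := by
        rw [advQ, if_pos ⟨by omega, by simp only [Int.toNat_natCast]; omega⟩]
      rw [if_neg hlarge, ha]
      exact ih

-- pass 2: the frontier loop equals the rescanning loop
theorem passB2_eq (pivot : Int) :
    ∀ (k : Nat) (q : Int) (l : List Int), -1 ≤ q → q ≤ (k : Int) - 1 →
    (∀ j : Int, q < j → 0 ≤ j → j ≤ (k : Int) - 1 → l.getD j.toNat 0 ≤ pivot) →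
    passB2 pivot k q l = passA2 pivot k l := by
  intro k
  induction k with
  | zero => intro q l _ _ _; rfl
  | succ t ih =>
    intro q l hqm hq hinv
    by_cases hbrk : l.getD t 0 < pivot
    · rw [passB2, if_pos hbrk, passA2, if_pos hbrk]
    · rw [passB2, if_neg hbrk, passA2, if_neg hbrk]
      have hmb : (-1 : Int) ≤ min q ((t : Int) - 1) := by omega
      have hmin : min q ((t : Int) - 1) ≤ (t : Int) - 1 := min_le_right _ _
      have hskip : advQ pivot l ((t : Int) - 1) = advQ pivot l (min q ((t : Int) - 1)) := by
        refine advQ_skip pivot l ((t : Int) - 1) (min q ((t : Int) - 1)) hmin hmb ?_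
        intro j h1 h2 h3
        exact hinv j (by omega) h3 (by push_cast; omega)
      have hrm : -1 ≤ advQ pivot l (min q ((t : Int) - 1)) := advQ_ge pivot l _ hmb
      have hrle : advQ pivot l (min q ((t : Int) - 1)) ≤ (t : Int) - 1 :=
        le_trans (advQ_le pivot l _) hmin
      have hcov : ∀ j : Int, advQ pivot l (min q ((t : Int) - 1)) < j → 0 ≤ j →
          j ≤ (t : Int) - 1 → l.getD j.toNat 0 ≤ pivot := by
        intro j h1 h2 h3
        by_cases hj : j ≤ min q ((t : Int) - 1)
        · exact advQ_skipped pivot l _ j h1 hj h2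
        · exact hinv j (by omega) h2 (by push_cast; omega)
      rw [show (List.range t).reverse = (List.range' 0 t).reverse by simp [List.range_eq_range'],
          innerL_eq pivot t l t, hskip]
      show (if 0 ≤ advQ pivot l (min q ((t : Int) - 1)) then
              passB2 pivot t (advQ pivot l (min q ((t : Int) - 1)))
                (swapL l t (advQ pivot l (min q ((t : Int) - 1))).toNat)
            else passB2 pivot t (advQ pivot l (min q ((t : Int) - 1))) l) = _
      by_cases hpos : (0 : Int) ≤ advQ pivot l (min q ((t : Int) - 1))
      · rw [if_pos hpos, if_pos hpos]
        refine ih _ _ hrm hrle ?_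
        intro j h1 h2 h3
        rw [swapL_getD_ne l t _ j.toNat (by omega) (by omega)]
        exact hcov j h1 h2 h3
      · rw [if_neg hpos, if_neg hpos]
        exact ih _ _ hrm (by omega) hcov

-- ===== VERDICT (by name: the statement is the Claim_ definition above) =====
theorem dutch_flag_partition_1_spec : Claim_equal_dutch_flag_partition_1 := by
  intro pivot_index A _ _
  unfold Spec_dutch_flag_partition_1 dutch_flag_partition_1 dutch_flag_partition_1_alt
  cases h : PySem.List.pyGet? A pivot_index with
  | none => rfl
  | some pivot =>
    show passA2 pivot A.length (passA1 pivot A.length 0 A) =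
      passB2 pivot A.length ((A.length : Int) - 1) (passB1 pivot A.length 0 0 A)
    rw [passB1_eq pivot A.length 0 0 A (by omega) (by omega)]
    rw [passB2_eq pivot A.length ((A.length : Int) - 1) _ (by omega) (by omega) (by omega)]
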